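-- pv_equiv track=rewrite | github.com/DrPritt/VS_Code_files | Eeleksami_näidisül/kapid_moosipurgid.py | nihuta_paremale
-- ===== SOURCE A (Python) =====
-- def nihuta_paremale(masiiv):
--     pikkus = len(masiiv[0])-1
--     for i, rida in enumerate(masiiv):
--         for j, num in enumerate(rida):
--             if j < pikkus:
--                 if rida[-1-j] == 0:
--                     rida[-1-j] = rida[-2-j]
--                     rida[-2-j] = 0
--             else:
--                 pass
--     return masiiv
-- ===== SOURCE B (Python) =====
-- def nihuta_paremale(masiiv):
--     # Equivalence is about the return value; like A, rows are mutated in place.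
--     pikkus = len(masiiv[0]) - 1
--     for rida in masiiv:
--         m = len(rida)
--         win = min(pikkus, m - 1)          # number of checked positions
--         if win <= 0:
--             continue
--         w = m - win                       # leftmost checked position
--         k0 = next((k for k in range(m - 1, w - 1, -1) if rida[k] == 0), None)
--         if k0 is not None:
--             rida[w - 1:k0 + 1] = [0] + rida[w - 1:k0]
--     return masiiv
-- ===== Notes on version B (the rewrite author's own statement) =====
-- stated objective: alternative
-- what changed: B replaces A's cell-by-cell sweep that repeatedly mutates and re-reads the row with a direct computation per row: locate the rightmost zero in the checked window and splice the row as prefix + [0] + shifted segment + suffix in one step.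
import Mathlib
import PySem

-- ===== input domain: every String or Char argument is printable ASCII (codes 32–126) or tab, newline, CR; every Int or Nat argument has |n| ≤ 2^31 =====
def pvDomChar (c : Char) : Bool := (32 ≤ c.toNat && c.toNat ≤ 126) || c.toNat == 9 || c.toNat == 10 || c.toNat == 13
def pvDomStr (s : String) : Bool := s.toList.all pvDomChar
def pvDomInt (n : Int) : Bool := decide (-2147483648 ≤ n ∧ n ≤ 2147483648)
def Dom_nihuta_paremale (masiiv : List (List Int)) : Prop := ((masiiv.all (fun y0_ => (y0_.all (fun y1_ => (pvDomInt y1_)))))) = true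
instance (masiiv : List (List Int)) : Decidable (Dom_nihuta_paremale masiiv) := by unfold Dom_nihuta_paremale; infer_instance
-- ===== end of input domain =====

-- B replaces A's cell-by-cell swap sweep with a direct splice at the rightmost zero of each
-- row's checked window (objective: alternative decomposition).  A mutates the rows of its
-- argument in place (the Python B performs the same mutation); the equivalence proved here
-- is about the return value.

-- ===== PORT A =====
-- inner loop of A: 'for j, num in enumerate(rida): if j < pikkus: if rida[-1-j]==0: swap'
def pvSweepA (pikkus : Int) (rida : List Int) : List Int :=
  (List.range rida.length).foldl (fun r (j : Nat) =>
    if (j : Int) < pikkus then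
      if PySem.List.pyGetD r (-1 - (j : Int)) 0 = 0 then
        PySem.List.pySetD
          (PySem.List.pySetD r (-1 - (j : Int)) (PySem.List.pyGetD r (-2 - (j : Int)) 0))
          (-2 - (j : Int)) 0
      else r
    else r) rida

def nihuta_paremale (masiiv : List (List Int)) : List (List Int) :=
  let pikkus : Int := ((PySem.List.pyGetD masiiv 0 []).length : Int) - 1
  masiiv.map (fun rida => pvSweepA pikkus rida)

-- ===== PORT B =====
-- per-row body of B: window = last min(pikkus, m-1) cells; splice at the rightmost zero
def pvAltRow (pikkus : Int) (rida : List Int) : List Int :=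
  let m : Int := (rida.length : Int)
  let win : Int := min pikkus (m - 1)
  if win ≤ 0 then rida
  else
    let w : Int := m - win
    match (PySem.List.pyRange (m - 1) (w - 1) (-1)).find?
            (fun k => PySem.List.pyGetD rida k 0 == 0) with
    | none => rida
    | some k0 =>
        PySem.List.slice rida none (some (w - 1)) ++ [0] ++
        PySem.List.slice rida (some (w - 1)) (some k0) ++
        PySem.List.slice rida (some (k0 + 1)) none

def nihuta_paremale_alt (masiiv : List (List Int)) : List (List Int) :=
  let pikkus : Int := ((PySem.List.pyGetD masiiv 0 []).length : Int) - 1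
  masiiv.map (fun rida => pvAltRow pikkus rida)

-- ===== PRECONDITION & SPEC =====
-- Pre_ excludes exactly the inputs on which A raises IndexError: the empty matrix, and
-- matrices in which some row shorter than row 0 contains a 0 (the moving zero reaches the
-- row's front and A indexes past it).
def Pre_nihuta_paremale (masiiv : List (List Int)) : Prop :=
  masiiv ≠ [] ∧ ∀ rida ∈ masiiv, (masiiv.headD []).length ≤ rida.length ∨ (0 : Int) ∉ rida
instance (masiiv : List (List Int)) : Decidable (Pre_nihuta_paremale masiiv) := by
  unfold Pre_nihuta_paremale; infer_instance

def pvWitness_nihuta_paremale : List (List Int) := [[1, 0, 2], [3, 4, 5]]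

def Spec_nihuta_paremale (masiiv : List (List Int)) (out : List (List Int)) : Prop :=
  out = nihuta_paremale_alt masiiv
instance (masiiv : List (List Int)) (out : List (List Int)) : Decidable (Spec_nihuta_paremale masiiv out) := by
  unfold Spec_nihuta_paremale; infer_instance

-- ===== CLAIM (what is proved, stated in full; the proofs are below) =====
def Claim_equal_nihuta_paremale : Prop := ∀ (masiiv : List (List Int)), Dom_nihuta_paremale masiiv → Pre_nihuta_paremale masiiv → Spec_nihuta_paremale masiiv (nihuta_paremale masiiv)

-- ===== LEMMAS AND PROOFS =====

-- A's step in reversed coordinates (cell j counted from the right), as a total function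
def pvGb (b : List Int) (j : Nat) : List Int :=
  if b.getD j 0 = 0 then (b.set j (b.getD (j + 1) 0)).set (j + 1) 0 else b

-- A's sweep as a structural recursion on the reversed row (a zero carried rightwards)
def pvBub : Nat → List Int → List Int
  | 0, b => b
  | _ + 1, [] => []
  | _ + 1, [x] => [x]
  | t + 1, x :: y :: r => if x = 0 then y :: pvBub t (0 :: r) else x :: pvBub t (y :: r)

-- A's step without the 'j < pikkus' guard
def pvG (r : List Int) (j : Nat) : List Int :=
  if PySem.List.pyGetD r (-1 - (j : Int)) 0 = 0 then
    PySem.List.pySetD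
      (PySem.List.pySetD r (-1 - (j : Int)) (PySem.List.pyGetD r (-2 - (j : Int)) 0))
      (-2 - (j : Int)) 0
  else r

def pvF (t : Nat) (a : List Int) : List Int := (List.range t).foldl pvG a
def pvFb (t : Nat) (b : List Int) : List Int := (List.range t).foldl pvGb b

theorem pvGb_length (b : List Int) (j : Nat) : (pvGb b j).length = b.length := by
  unfold pvGb; split <;> simp

theorem pvGb_cons_succ (c : Int) (s : List Int) (j : Nat) :
    pvGb (c :: s) (j + 1) = c :: pvGb s j := by
  unfold pvGb
  simp only [List.getD_cons_succ, List.set_cons_succ]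
  split <;> rfl

theorem pvGb_nil (j : Nat) : pvGb [] j = [] := by
  unfold pvGb; simp [List.getD]

theorem pvGb_singleton (x : Int) (j : Nat) : pvGb [x] j = [x] := by
  unfold pvGb
  rcases j with _ | j
  · rcases eq_or_ne x 0 with rfl | hx
    · simp
    · simp [hx]
  · rw [List.set_eq_of_length_le (by simp)]
    rw [List.set_eq_of_length_le (by simp)]
    simp

theorem pvFoldl_id {α β : Type} (f : α → β → α) (l : List β) (s : α)
    (h : ∀ x ∈ l, f s x = s) : l.foldl f s = s := by
  induction l with
  | nil => rfl
  | cons x xs ih => simp only [List.foldl_cons, h x (by simp)]; exact ih (fun y hy => h y (by simp [hy]))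

theorem pvFoldl_shift_cons (l : List Nat) (c : Int) (s : List Int) :
    l.foldl (fun r j => pvGb r (j + 1)) (c :: s) = c :: l.foldl pvGb s := by
  induction l generalizing s with
  | nil => rfl
  | cons x xs ih => simp only [List.foldl_cons, pvGb_cons_succ]; exact ih _

theorem pvFb_succ_head (t : Nat) (b : List Int) :
    pvFb (t + 1) b = (List.range t).foldl (fun r j => pvGb r (j + 1)) (pvGb b 0) := by
  unfold pvFb
  rw [List.range_succ_eq_map, List.foldl_cons, List.foldl_map]

theorem pvBub_cons_cons (t : Nat) (x y : Int) (r : List Int) :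
    pvBub (t + 1) (x :: y :: r) = if x = 0 then y :: pvBub t (0 :: r) else x :: pvBub t (y :: r) := rfl

theorem pvFb_eq_pvBub (t : Nat) (b : List Int) : pvFb t b = pvBub t b := by
  induction t generalizing b with
  | zero => rfl
  | succ t ih =>
    rw [pvFb_succ_head]
    match b with
    | [] =>
      rw [pvGb_nil]
      rw [pvFoldl_id _ _ _ (fun x _ => pvGb_nil (x+1))]
      rfl
    | [x] =>
      rw [pvGb_singleton]
      rw [pvFoldl_id _ _ _ (fun j _ => by
        rw [pvGb_cons_succ, pvGb_nil])]
      rfl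
    | x :: y :: r =>
      have hz : pvGb (x :: y :: r) 0 = if x = 0 then y :: 0 :: r else x :: y :: r := by
        rcases eq_or_ne x 0 with rfl | hx
        · simp [pvGb]
        · simp [pvGb, hx]
      rw [hz]
      rcases eq_or_ne x 0 with rfl | hx
      · rw [if_pos rfl, pvFoldl_shift_cons]
        show _ = pvBub (t+1) (0::y::r)
        rw [pvBub_cons_cons, if_pos rfl]
        exact congrArg _ (ih _)
      · rw [if_neg hx, pvFoldl_shift_cons]
        show _ = pvBub (t+1) (x::y::r)
        rw [pvBub_cons_cons, if_neg hx]
        exact congrArg _ (ih _)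

theorem pvBub_of_no_zero (t : Nat) (b : List Int) (h : ∀ x ∈ b.take t, x ≠ 0) :
    pvBub t b = b := by
  induction t generalizing b with
  | zero => rfl
  | succ t ih =>
    match b with
    | [] => rfl
    | [x] => rfl
    | x :: y :: r =>
      have hx : x ≠ 0 := h x (by simp)
      rw [pvBub_cons_cons, if_neg hx]
      exact congrArg _ (ih _ (fun z hz => h z (by rw [List.take_succ_cons]; exact List.mem_cons_of_mem x hz)))

theorem pvBub_zero_head (t : Nat) (q : List Int) :
    pvBub t (0 :: q) = q.take t ++ 0 :: q.drop t := by
  induction t generalizing q with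
  | zero => simp [pvBub]
  | succ t ih =>
    match q with
    | [] => rfl
    | y :: r =>
      rw [pvBub_cons_cons, if_pos rfl, ih]
      simp

theorem pvBub_split (t : Nat) (p q : List Int) (hp : ∀ x ∈ p, x ≠ 0) (ht : p.length < t) :
    pvBub t (p ++ 0 :: q) = p ++ q.take (t - p.length) ++ 0 :: q.drop (t - p.length) := by
  induction p generalizing t with
  | nil => simpa using pvBub_zero_head t q
  | cons x p' ih =>
    have hx : x ≠ 0 := hp x (by simp)
    rcases t with _ | t
    · omega
    match p' with
    | [] =>
      rw [show (x :: ([] : List Int) ++ 0 :: q) = x :: 0 :: q from rfl, pvBub_cons_cons, if_neg hx]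
      simpa using pvBub_zero_head t q
    | z :: p'' =>
      rw [show (x :: (z :: p'') ++ 0 :: q) = x :: z :: (p'' ++ 0 :: q) by simp, pvBub_cons_cons, if_neg hx]
      have := ih (fun w hw => hp w (by simp [hw])) (t := t) (by simp at ht ⊢; omega)
      simp only [List.cons_append] at this ⊢
      rw [this]
      have h1 : t - (z :: p'').length = t + 1 - (x :: z :: p'').length := by
        simp only [List.length_cons]
        omega
      rw [h1]

theorem pvSetD_neg (r : List Int) (k : Nat) (v : Int) (h1 : 0 < k) (h2 : k ≤ r.length) :
    PySem.List.pySetD r (-(k : Int)) v = r.set (r.length - k) v := by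
  unfold PySem.List.pySetD PySem.List.pySet? PySem.List.pyIdx?
  have hneg : ¬ (0 : Int) ≤ -(k : Int) := by omega
  rw [if_neg hneg, if_pos (by omega)]
  simp

theorem pvSetD_oob_neg (r : List Int) (k : Nat) (v : Int) (h2 : r.length < k) :
    PySem.List.pySetD r (-(k : Int)) v = r := by
  unfold PySem.List.pySetD PySem.List.pySet? PySem.List.pyIdx?
  have hneg : ¬ (0 : Int) ≤ -(k : Int) := by omega
  rw [if_neg hneg, if_neg (by omega)]
  simp

theorem pvGetD_neg_oob (r : List Int) (k : Nat) (h2 : r.length < k) :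
    PySem.List.pyGetD r (-(k : Int)) 0 = 0 := by
  apply PySem.List.pyGetD_of_none
  rw [PySem.List.pyGet?_eq_none_iff]
  unfold PySem.Raise.InRange
  omega

theorem pvReverse_set (l : List Int) (j : Nat) (v : Int) (hj : j < l.length) :
    l.reverse.set j v = (l.set (l.length - 1 - j) v).reverse := by
  apply List.ext_getElem
  · simp
  · intro i h1 h2
    simp only [List.length_set, List.length_reverse] at h1 h2
    rw [List.getElem_set, List.getElem_reverse, List.getElem_reverse, List.getElem_set]
    simp only [List.length_set]
    split_ifs <;> first | rfl | omega

theorem pvG_eq_pvGb (r : List Int) (j : Nat) (hj : j < r.length) :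
    pvG r j = (pvGb r.reverse j).reverse := by
  unfold pvG pvGb
  have e1 : (-1 - (j : Int)) = -(((j + 1 : Nat)) : Int) := by push_cast; ring
  have e2 : (-2 - (j : Int)) = -(((j + 2 : Nat)) : Int) := by push_cast; ring
  have hget1 : PySem.List.pyGetD r (-1 - (j : Int)) 0 = r.reverse.getD j 0 := by
    rw [e1, PySem.List.pyGetD_neg_natCast r (j+1) 0 (by omega) (by omega)]
    rw [List.getD_eq_getElem _ _ (by simpa using hj)]
    rw [List.getElem_reverse]
    congr 1
    omega
  have hget2 : PySem.List.pyGetD r (-2 - (j : Int)) 0 = r.reverse.getD (j + 1) 0 := by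
    rw [e2]
    rcases Nat.lt_or_ge (j + 1) r.length with h | h
    · rw [PySem.List.pyGetD_neg_natCast r (j+2) 0 (by omega) (by omega)]
      rw [List.getD_eq_getElem _ _ (by simpa using h)]
      rw [List.getElem_reverse]
      congr 1
      omega
    · rw [pvGetD_neg_oob r (j+2) (by omega)]
      rw [List.getD_eq_default _ _ (by simpa using h)]
  rw [hget1, hget2]
  by_cases hc : r.reverse.getD j 0 = 0
  · rw [if_pos hc, if_pos hc]
    have hset1 : PySem.List.pySetD r (-1 - (j : Int)) (r.reverse.getD (j+1) 0)
        = (r.reverse.set j (r.reverse.getD (j+1) 0)).reverse := by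
      rw [e1, pvSetD_neg r (j+1) _ (by omega) (by omega)]
      have hidx : r.length - (j + 1) = r.length - 1 - j := by omega
      rw [hidx, pvReverse_set _ _ _ hj, List.reverse_reverse]
    rw [hset1]
    set r1 := r.reverse.set j (r.reverse.getD (j+1) 0) with hr1
    have hr1len : r1.length = r.length := by simp [hr1]
    rcases Nat.lt_or_ge (j + 1) r.length with h | h
    · rw [e2, pvSetD_neg r1.reverse (j+2) 0 (by omega) (by simp only [List.length_reverse, hr1len]; omega)]
      have hidx2 : r1.reverse.length - (j + 2) = r1.length - 1 - (j + 1) := by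
        simp only [List.length_reverse]; omega
      rw [hidx2, pvReverse_set _ _ _ (by simp only [hr1len]; omega)]
      have hidx3 : r1.length - 1 - (r1.length - 1 - (j + 1)) = j + 1 := by
        simp only [hr1len]; omega
      rw [hidx3]
    · rw [e2, pvSetD_oob_neg r1.reverse (j+2) 0 (by simp only [List.length_reverse, hr1len]; omega)]
      rw [List.set_eq_of_length_le (l := r1) (by simp only [hr1len]; omega)]
  · rw [if_neg hc, if_neg hc, List.reverse_reverse]

theorem pvSweepA_of_nonpos (pikkus : Int) (rida : List Int) (h : pikkus ≤ 0) :
    pvSweepA pikkus rida = rida := by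
  unfold pvSweepA
  exact pvFoldl_id _ _ _ (fun j _ => if_neg (by omega))

theorem pvSweepA_eq_pvF (pikkus : Int) (rida : List Int) (h : 0 < pikkus) :
    pvSweepA pikkus rida = pvF (min pikkus.toNat rida.length) rida := by
  have hbody : pvSweepA pikkus rida
      = (List.range rida.length).foldl (fun r (j : Nat) => if (j : Int) < pikkus then pvG r j else r) rida := rfl
  rw [hbody]
  rcases (by omega : rida.length ≤ pikkus.toNat ∨ pikkus.toNat < rida.length) with hle | hlt
  · rw [Nat.min_eq_right hle]
    unfold pvF
    exact PySem.List.foldl_congr_mem _ _ _ _ (fun acc j hj => by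
      rw [if_pos]
      have := List.mem_range.mp hj
      omega)
  · rw [Nat.min_eq_left (by omega)]
    unfold pvF
    have hsplit : rida.length = pikkus.toNat + (rida.length - pikkus.toNat) := by omega
    rw [hsplit, List.range_add, List.foldl_append]
    have h1 : (List.range pikkus.toNat).foldl (fun r (j : Nat) => if (j : Int) < pikkus then pvG r j else r) rida
        = (List.range pikkus.toNat).foldl pvG rida :=
      PySem.List.foldl_congr_mem _ _ _ _ (fun acc j hj => by
        rw [if_pos]
        have := List.mem_range.mp hj
        omega)
    rw [h1]
    exact pvFoldl_id _ _ _ (fun j hj => by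
      rw [if_neg]
      simp only [List.mem_map, List.mem_range] at hj
      obtain ⟨x, _, rfl⟩ := hj
      omega)

theorem pvFb_length (t : Nat) (b : List Int) : (pvFb t b).length = b.length := by
  unfold pvFb
  induction t with
  | zero => rfl
  | succ t ih => rw [List.range_succ, List.foldl_append, List.foldl_cons, List.foldl_nil, pvGb_length, ih]

theorem pvF_eq_pvFb (t : Nat) (a : List Int) (h : t ≤ a.length) :
    pvF t a = (pvFb t a.reverse).reverse := by
  induction t with
  | zero => simp [pvF, pvFb]
  | succ t ih =>
    unfold pvF pvFb
    rw [List.range_succ, List.foldl_append, List.foldl_append]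
    simp only [List.foldl_cons, List.foldl_nil]
    show pvG (pvF t a) t = (pvGb (pvFb t a.reverse) t).reverse
    rw [ih (by omega)]
    rw [pvG_eq_pvGb _ _ (by rw [List.length_reverse, pvFb_length, List.length_reverse]; omega)]
    rw [List.reverse_reverse]

theorem pvFindDesc_none (pred : Int → Bool) (hi lo : Int)
    (h : ∀ k : Int, lo < k → k ≤ hi → pred k = false) :
    (PySem.List.pyRange hi lo (-1)).find? pred = none := by
  rw [List.find?_eq_none]
  intro x hx
  rw [PySem.List.mem_pyRange_neg_one] at hx
  simp [h x hx.1 hx.2]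

theorem pvFindDesc_some_aux (pred : Int → Bool) :
    ∀ (n : Nat) (hi lo k0 : Int), (hi - lo).toNat = n →
    (PySem.List.pyRange hi lo (-1)).find? pred = some k0 →
    lo < k0 ∧ k0 ≤ hi ∧ pred k0 = true ∧ ∀ j : Int, k0 < j → j ≤ hi → pred j = false := by
  intro n
  induction n with
  | zero =>
    intro hi lo k0 hn h
    rw [PySem.List.pyRange_neg_one_eq_nil (by omega)] at h
    simp at h
  | succ n ih =>
    intro hi lo k0 hn h
    rw [PySem.List.pyRange_neg_one_cons (by omega)] at h
    by_cases hp : pred hi = true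
    · rw [List.find?_cons_of_pos hp] at h
      obtain rfl : hi = k0 := by injection h
      exact ⟨by omega, le_refl _, hp, fun j h1 h2 => by omega⟩
    · rw [List.find?_cons_of_neg hp] at h
      obtain ⟨h1, h2, h3, h4⟩ := ih (hi - 1) lo k0 (by omega) h
      refine ⟨h1, by omega, h3, fun j hj1 hj2 => ?_⟩
      rcases (by omega : j ≤ hi - 1 ∨ j = hi) with hc | rfl
      · exact h4 j hj1 hc
      · simpa using hp

-- the zeta-reduced form of pvAltRow
theorem pvAltRow_eq (pikkus : Int) (rida : List Int) :
    pvAltRow pikkus rida =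
      if min pikkus ((rida.length : Int) - 1) ≤ 0 then rida
      else
        match (PySem.List.pyRange ((rida.length : Int) - 1)
                 (((rida.length : Int) - min pikkus ((rida.length : Int) - 1)) - 1) (-1)).find?
                (fun k => PySem.List.pyGetD rida k 0 == 0) with
        | none => rida
        | some k0 =>
            PySem.List.slice rida none (some (((rida.length : Int) - min pikkus ((rida.length : Int) - 1)) - 1)) ++ [0] ++
            PySem.List.slice rida (some (((rida.length : Int) - min pikkus ((rida.length : Int) - 1)) - 1)) (some k0) ++
            PySem.List.slice rida (some (k0 + 1)) none := rfl

theorem pvRow_eq (pikkus : Int) (rida : List Int)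
    (h : pikkus < (rida.length : Int) ∨ (0 : Int) ∉ rida) :
    pvSweepA pikkus rida = pvAltRow pikkus rida := by
  by_cases hp : pikkus ≤ 0
  · rw [pvSweepA_of_nonpos _ _ hp, pvAltRow_eq, if_pos (by omega)]
  · rw [not_le] at hp
    set m : Nat := rida.length with hmdef
    have hsweep : pvSweepA pikkus rida = (pvBub (min pikkus.toNat m) rida.reverse).reverse := by
      rw [pvSweepA_eq_pvF _ _ hp, pvF_eq_pvFb _ _ (min_le_right _ _), pvFb_eq_pvBub]
    by_cases hz : ∀ x ∈ rida.reverse.take (min pikkus.toNat m), x ≠ (0 : Int)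
    · -- no zero reached by the sweep: both sides return rida
      rw [hsweep, pvBub_of_no_zero _ _ hz, List.reverse_reverse, pvAltRow_eq]
      by_cases hwin : min pikkus ((m : Int) - 1) ≤ 0
      · rw [if_pos hwin]
      · rw [if_neg hwin]
        have hfind : (PySem.List.pyRange ((m : Int) - 1)
            (((m : Int) - min pikkus ((m : Int) - 1)) - 1) (-1)).find?
            (fun k => PySem.List.pyGetD rida k 0 == 0) = none := by
          apply pvFindDesc_none
          intro k hk1 hk2
          have hk0 : 0 ≤ k := by omega
          have hkm : k.toNat < m := by omega
          have hgd : PySem.List.pyGetD rida k 0 = rida[k.toNat] := by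
            rw [PySem.List.pyGetD_of_nonneg _ _ hk0, List.getD_eq_getElem _ _ hkm]
          rw [hgd]
          simp only [beq_eq_false_iff_ne, ne_eq]
          have hmem : rida[k.toNat] ∈ rida.reverse.take (min pikkus.toNat m) := by
            rw [List.mem_iff_getElem]
            refine ⟨m - 1 - k.toNat, by simp; omega, ?_⟩
            rw [List.getElem_take, List.getElem_reverse]
            congr 1
            omega
          exact hz _ hmem
        rw [hfind]
    · -- a zero is reached by the sweep: splice case
      rw [not_forall] at hz
      have hz' : ∃ x ∈ rida.reverse.take (min pikkus.toNat m), x = (0 : Int) := by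
        obtain ⟨x, hx⟩ := hz
        rw [Classical.not_imp, not_not] at hx
        exact ⟨x, hx.1, hx.2⟩
      obtain ⟨x0, hx0mem, rfl⟩ := hz'
      have h0rida : (0 : Int) ∈ rida := by
        have := List.take_subset _ _ hx0mem
        simpa using this
      have hpm : pikkus < (m : Int) := by
        rcases h with h | h
        · exact h
        · exact absurd h0rida h
      have htm : min pikkus.toNat m = pikkus.toNat := by omega
      set t : Nat := pikkus.toNat with htdef
      have htm' : t < m := by omega
      have ht1 : 1 ≤ t := by omega
      have hwin : min pikkus ((m : Int) - 1) = pikkus := by omega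
      rcases hfind : (PySem.List.pyRange ((m : Int) - 1)
          (((m : Int) - min pikkus ((m : Int) - 1)) - 1) (-1)).find?
          (fun k => PySem.List.pyGetD rida k 0 == 0) with _ | k0
      · exfalso
        rw [List.find?_eq_none] at hfind
        rw [List.mem_iff_getElem] at hx0mem
        obtain ⟨i, hi, hgi⟩ := hx0mem
        have hilen : i < t := by
          have := hi
          simp only [List.length_take, List.length_reverse, htm] at this
          omega
        have him : i < m := by omega
        have hgi' : rida[m - 1 - i] = 0 := by
          rw [List.getElem_take] at hgi
          rw [List.getElem_reverse] at hgi
          simpa using hgi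
        have hkmem : ((m - 1 - i : Nat) : Int) ∈ PySem.List.pyRange ((m : Int) - 1)
            (((m : Int) - min pikkus ((m : Int) - 1)) - 1) (-1) := by
          rw [PySem.List.mem_pyRange_neg_one, hwin]
          omega
        have hfk := hfind _ hkmem
        rw [PySem.List.pyGetD_natCast, List.getD_eq_getElem _ _ (by omega)] at hfk
        simp [hgi'] at hfk
      · obtain ⟨hf1, hf2, hf3, hf4⟩ := pvFindDesc_some_aux _ ((((m:Int)-1) - ((((m:Int)) - min pikkus ((m : Int) - 1)) - 1)).toNat) _ _ _ rfl hfind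
        rw [hwin] at hf1
        set k0N : Nat := k0.toNat with hk0def
        have hk0m : k0N < m := by omega
        have hk0w : m - t ≤ k0N := by omega
        have hk0nn : (0:Int) ≤ k0 := by omega
        have hrk0 : rida[k0N] = 0 := by
          rw [beq_iff_eq, PySem.List.pyGetD_of_nonneg _ _ hk0nn,
            List.getD_eq_getElem _ _ (by omega)] at hf3
          exact hf3
        set p : List Int := (rida.drop (k0N + 1)).reverse with hpdef
        set q : List Int := (rida.take k0N).reverse with hqdef
        have hdec0 : rida = rida.take k0N ++ (0 : Int) :: rida.drop (k0N + 1) := by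
          conv_lhs => rw [← List.take_append_drop k0N rida]
          rw [List.drop_eq_getElem_cons (by omega), hrk0]
        have hrev : rida.reverse = p ++ 0 :: q := by
          conv_lhs => rw [hdec0]
          rw [List.reverse_append, List.reverse_cons, hpdef, hqdef]
          simp [List.append_assoc]
        have hp_nz : ∀ x ∈ p, x ≠ (0 : Int) := by
          intro x hx
          rw [hpdef, List.mem_reverse, List.mem_iff_getElem] at hx
          obtain ⟨i, hi, rfl⟩ := hx
          have hi' : i < m - (k0N + 1) := by simpa using hi
          have hj4 := hf4 ((k0N + 1 + i : Nat) : Int) (by push_cast; omega) (by push_cast; omega)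
          rw [PySem.List.pyGetD_natCast, List.getD_eq_getElem _ _ (by omega)] at hj4
          simp only [beq_eq_false_iff_ne, ne_eq] at hj4
          rw [List.getElem_drop]
          exact hj4
        have hplen : p.length = m - (k0N + 1) := by simp [hpdef, hmdef]
        have hpt : p.length < t := by omega
        rw [hsweep, htm, hrev, pvBub_split t p q hp_nz hpt]
        set s : Nat := t - p.length with hsdef
        have hqlen : q.length = k0N := by simp [hqdef]; omega
        have hks : k0N - s = m - t - 1 := by omega
        have htake : q.take s = ((rida.take k0N).drop (k0N - s)).reverse := by
          rw [hqdef, List.take_reverse]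
          congr 2
          simp
          omega
        have hdrop : q.drop s = (rida.take (k0N - s)).reverse := by
          rw [hqdef, List.drop_reverse]
          rw [show (rida.take k0N).length - s = k0N - s by simp; omega]
          rw [List.take_take, Nat.min_eq_left (by omega)]
        rw [htake, hdrop]
        rw [List.reverse_append, List.reverse_append, List.reverse_cons, List.reverse_reverse,
          List.reverse_reverse, hpdef, List.reverse_reverse]
        rw [hwin] at hfind
        rw [pvAltRow_eq, ← hmdef, hwin, if_neg (by omega), hfind]
        show _ = PySem.List.slice rida none (some ((m : Int) - pikkus - 1)) ++ [0] ++
          PySem.List.slice rida (some ((m : Int) - pikkus - 1)) (some k0) ++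
          PySem.List.slice rida (some (k0 + 1)) none
        rw [PySem.List.slice_to _ (by omega), PySem.List.slice_from _ (by omega),
          PySem.List.slice_of_nonneg _ (by omega) (by omega) (by omega) (by omega)]
        have e1 : ((m : Int) - pikkus - 1).toNat = m - t - 1 := by omega
        have e2 : ((k0 : Int) + 1).toNat = k0N + 1 := by omega
        rw [e1, e2, hks]
        rw [List.drop_take]
        have e3 : k0N - (m - t - 1) = k0.toNat - ((m:Int) - pikkus - 1).toNat := by
          rw [e1]
        rw [e3]
        simp [List.append_assoc]

-- ===== VERDICT (by name: the statement is the Claim_ definition above) =====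
theorem nihuta_paremale_spec : Claim_equal_nihuta_paremale := by
  intro masiiv _ hpre
  unfold Spec_nihuta_paremale nihuta_paremale nihuta_paremale_alt
  obtain ⟨hne, hrows⟩ := hpre
  apply List.map_congr_left
  intro rida hmem
  apply pvRow_eq
  match masiiv, hne with
  | m0 :: rest, _ =>
    rcases hrows rida hmem with hlen | hnz
    · left
      rw [PySem.List.pyGetD_zero_cons]
      simp only [List.headD_cons] at hlen
      omega
    · right
      exact hnz
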